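-- pv_equiv track=rewrite | github.com/Hash9896/badminton-analysis | generate_12_key_takeaways.py | create_frame_spans
-- ===== SOURCE A (Python) =====
-- from typing import Dict, List, Tuple, Any, Optional
--
-- def create_frame_spans(frame_numbers: List[str]) -> str:
--     """Create frame span strings from frame numbers."""
--     if not frame_numbers:
--         return ""
--
--     # Convert to integers and sort
--     frames = sorted([int(f) for f in frame_numbers if f.isdigit()])
--     if not frames:
--         return ""
--
--     # Group consecutive frames into ranges
--     spans = []
--     start = frames[0]
--     end = frames[0]
--
--     for i in range(1, len(frames)):
--         if frames[i] == end + 1: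
--             end = frames[i]
--         else:
--             if start == end:
--                 spans.append(str(start))
--             else:
--                 spans.append(f"{start}-{end}")
--             start = end = frames[i]
--
--     # Add the last span
--     if start == end:
--         spans.append(str(start))
--     else:
--         spans.append(f"{start}-{end}")
--
--     return f"({', '.join(spans)})"
-- ===== SOURCE B (Python) =====
-- def create_frame_spans(frame_numbers):
--     """Create frame span strings from frame numbers."""
--     if not frame_numbers:
--         return ""
--
--     frames = sorted(int(f) for f in frame_numbers if f.isdigit())
--     if not frames:
--         return ""
--
--     # Staged passes, no run-tracking state: first compute every break index
--     # (positions where the sorted sequence is not consecutive), then turn each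
--     # adjacent pair of boundaries into one span.
--     n = len(frames)
--     bounds = [0] + [i for i in range(1, n) if frames[i] != frames[i - 1] + 1] + [n]
--     spans = [
--         str(frames[a]) if frames[a] == frames[b - 1] else f"{frames[a]}-{frames[b - 1]}"
--         for a, b in zip(bounds, bounds[1:])
--     ]
--     return f"({', '.join(spans)})"
-- ===== Notes on version B (the rewrite author's own statement) =====
-- stated objective: alternative
-- what changed: Replaced A's single-pass start/end state machine with a staged, stateless pipeline: one comprehension computes all break indices where consecutiveness fails, and a zip over adjacent boundary pairs formats each segment into its span.
import Mathlib
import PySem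

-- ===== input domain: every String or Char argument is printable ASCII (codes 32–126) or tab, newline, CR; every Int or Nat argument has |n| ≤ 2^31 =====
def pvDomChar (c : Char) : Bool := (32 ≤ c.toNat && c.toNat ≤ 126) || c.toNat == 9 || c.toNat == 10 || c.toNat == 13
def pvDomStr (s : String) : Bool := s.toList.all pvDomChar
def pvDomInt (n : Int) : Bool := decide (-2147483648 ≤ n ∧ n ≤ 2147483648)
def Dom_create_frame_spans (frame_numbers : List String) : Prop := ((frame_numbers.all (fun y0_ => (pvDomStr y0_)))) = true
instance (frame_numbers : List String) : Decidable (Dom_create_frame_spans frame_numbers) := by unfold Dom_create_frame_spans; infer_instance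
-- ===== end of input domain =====

-- B replaces A's single-pass start/end state machine by a stateless staged pipeline:
-- compute all break indices first, then format each adjacent boundary pair into a span
-- (alternative decomposition, no speed claim).

-- ===== PORT A =====
-- str(start) / f"{start}-{end}" span formatting of A
def pvSpanA (s e : Int) : String :=
  if s = e then PySem.Int.toStr s else PySem.Int.toStr s ++ "-" ++ PySem.Int.toStr e

-- A's loop body, on the fetched value frames[i]
def pvStepA (st : List String × Int × Int) (x : Int) : List String × Int × Int :=
  if x = st.2.2 + 1 then (st.1, st.2.1, x)
  else (st.1 ++ [pvSpanA st.2.1 st.2.2], x, x)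

def create_frame_spans (frame_numbers : List String) : String :=
  if frame_numbers = [] then "" else
  -- [int(f) for f in frame_numbers if f.isdigit()]: on an all-digit string int() always
  -- succeeds, so the ValueError default of getD 0 is never taken
  let frames := PySem.List.sorted
      ((frame_numbers.filter (fun f => PySem.Str.strIsdigit f)).map
        (fun f => (PySem.Int.ofStr? f).getD 0)) (fun x => x) false
  if frames = [] then "" else
  let start := PySem.List.pyGetD frames 0 0
  let st := (PySem.List.pyRange 1 (frames.length : Int) 1).foldl
      (fun st i => pvStepA st (PySem.List.pyGetD frames i 0)) ([], start, start)
  let spans := st.1 ++ [pvSpanA st.2.1 st.2.2]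
  "(" ++ PySem.Str.join ", " spans ++ ")"

-- ===== PORT B =====
-- str(frames[a]) if frames[a] == frames[b-1] else f"{frames[a]}-{frames[b-1]}"
def pvFmt (frames : List Int) (a b : Int) : String :=
  if PySem.List.pyGetD frames a 0 = PySem.List.pyGetD frames (b - 1) 0
  then PySem.Int.toStr (PySem.List.pyGetD frames a 0)
  else PySem.Int.toStr (PySem.List.pyGetD frames a 0) ++ "-"
        ++ PySem.Int.toStr (PySem.List.pyGetD frames (b - 1) 0)

def create_frame_spans_alt (frame_numbers : List String) : String :=
  if frame_numbers = [] then "" else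
  let frames := PySem.List.sorted
      ((frame_numbers.filter (fun f => PySem.Str.strIsdigit f)).map
        (fun f => (PySem.Int.ofStr? f).getD 0)) (fun x => x) false
  if frames = [] then "" else
  let n : Int := frames.length
  -- bounds = [0] + [i for i in range(1, n) if frames[i] != frames[i-1] + 1] + [n]
  let bounds : List Int :=
    0 :: ((PySem.List.pyRange 1 n 1).filter
      (fun i => decide (PySem.List.pyGetD frames i 0 ≠ PySem.List.pyGetD frames (i - 1) 0 + 1))
      ++ [n])
  -- [fmt(a, b) for a, b in zip(bounds, bounds[1:])]
  let spans := (bounds.zip (PySem.List.slice bounds (some 1) none)).map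
      (fun p => pvFmt frames p.1 p.2)
  "(" ++ PySem.Str.join ", " spans ++ ")"

-- ===== PRECONDITION & SPEC =====
def Spec_create_frame_spans (frame_numbers : List String) (out : String) : Prop := out = create_frame_spans_alt frame_numbers
instance (frame_numbers : List String) (out : String) : Decidable (Spec_create_frame_spans frame_numbers out) := by unfold Spec_create_frame_spans; infer_instance

-- ===== CLAIM (what is proved, stated in full; the proofs are below) =====
def Claim_equal_create_frame_spans : Prop := ∀ (frame_numbers : List String), Dom_create_frame_spans frame_numbers → Spec_create_frame_spans frame_numbers (create_frame_spans frame_numbers)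

-- ===== LEMMAS AND PROOFS =====

-- A's state machine as structural recursion over the remaining values
def pvSpansOf (s e : Int) : List Int → List String
  | [] => [pvSpanA s e]
  | x :: xs => if x = e + 1 then pvSpansOf s x xs else pvSpanA s e :: pvSpansOf x x xs

theorem pvFoldA (rest : List Int) : ∀ (spans : List String) (s e : Int),
    (let st := rest.foldl pvStepA (spans, s, e); st.1 ++ [pvSpanA st.2.1 st.2.2])
      = spans ++ pvSpansOf s e rest := by
  induction rest with
  | nil => intro spans s e; simp [pvSpansOf]
  | cons x xs ih =>
    intro spans s e
    simp only [List.foldl_cons, pvSpansOf, pvStepA]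
    by_cases hx : x = e + 1
    · simp [hx, ih]
    · simp [hx, ih]

-- the span list B produces from a boundary list, read as a recursion
def pvZS (frames : List Int) (a : Int) : List Int → List String
  | [] => []
  | b :: r => pvFmt frames a b :: pvZS frames b r

theorem pvZip_eq (frames : List Int) : ∀ (l : List Int) (a : Int),
    (((a :: l).zip l).map (fun p => pvFmt frames p.1 p.2)) = pvZS frames a l := by
  intro l
  induction l with
  | nil => intro a; simp [pvZS]
  | cons b r ih => intro a; simp [pvZS, ih]

-- B's break-index list from position i on
def pvBk (frames : List Int) (i : Nat) : List Int :=
  (PySem.List.pyRange (i : Int) (frames.length : Int) 1).filter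
    (fun k => decide (PySem.List.pyGetD frames k 0 ≠ PySem.List.pyGetD frames (k - 1) 0 + 1))

theorem pvFmt_eq (frames : List Int) (a j : Nat) (b : Int) (hb : b - 1 = (j : Int)) :
    pvFmt frames (a : Int) b = pvSpanA (frames.getD a 0) (frames.getD j 0) := by
  simp [pvFmt, pvSpanA, hb]

-- key invariant: from position j with current run start at index a, A's recursion
-- equals B's boundary formatting
theorem pvMain (frames : List Int) : ∀ (k j a : Nat),
    frames.length - j ≤ k → j < frames.length →
    pvSpansOf (frames.getD a 0) (frames.getD j 0) (frames.drop (j + 1))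
      = pvZS frames (a : Int) (pvBk frames (j + 1) ++ [(frames.length : Int)]) := by
  intro k
  induction k with
  | zero => intro j a hk hj; omega
  | succ k ih =>
    intro j a hk hj
    by_cases h1 : j + 1 < frames.length
    · have hrange : PySem.List.pyRange ((j + 1 : Nat) : Int) (frames.length : Int) 1
          = ((j + 1 : Nat) : Int) :: PySem.List.pyRange (((j + 1 : Nat) : Int) + 1) (frames.length : Int) 1 :=
        PySem.List.pyRange_one_cons (by exact_mod_cast h1)
      have hshift : (((j + 1 : Nat) : Int) + 1) = ((j + 2 : Nat) : Int) := by push_cast; ring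
      have harg : ((j + 1 : Nat) : Int) - 1 = (j : Int) := by push_cast; ring
      have g1 : PySem.List.pyGetD frames ((j + 1 : Nat) : Int) 0 = frames.getD (j + 1) 0 := by
        rw [PySem.List.pyGetD_natCast]
      have g2 : PySem.List.pyGetD frames (((j + 1 : Nat) : Int) - 1) 0 = frames.getD j 0 := by
        rw [harg, PySem.List.pyGetD_natCast]
      have hbk : pvBk frames (j + 1)
          = (if frames.getD (j + 1) 0 = frames.getD j 0 + 1 then [] else [((j + 1 : Nat) : Int)])
            ++ pvBk frames (j + 2) := by
        unfold pvBk
        rw [hrange, hshift]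
        simp only [List.filter_cons, g1, g2]
        split_ifs <;> simp_all
      have hdrop : frames.drop (j + 1) = frames[j + 1] :: frames.drop (j + 2) :=
        List.drop_eq_getElem_cons h1
      have hget : frames[j + 1] = frames.getD (j + 1) 0 :=
        (List.getD_eq_getElem frames 0 h1).symm
      rw [hdrop, hget]
      by_cases hp : frames.getD (j + 1) 0 = frames.getD j 0 + 1
      · -- consecutive: no break at j+1
        rw [pvSpansOf, if_pos hp, hbk, if_pos hp, List.nil_append]
        exact ih (j + 1) a (by omega) h1
      · -- break at j+1
        rw [pvSpansOf, if_neg hp, hbk, if_neg hp, List.singleton_append, List.cons_append]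
        simp only [pvZS]
        rw [pvFmt_eq frames a j ((j + 1 : Nat) : Int) (by push_cast; ring)]
        congr 1
        exact ih (j + 1) (j + 1) (by omega) h1
    · -- j + 1 = frames.length: last position
      have hlen : j + 1 = frames.length := by omega
      have hbk : pvBk frames (j + 1) = [] := by
        unfold pvBk
        rw [List.filter_eq_nil_iff.mpr]
        intro x hx
        rw [PySem.List.mem_pyRange_one] at hx
        omega
      rw [hbk, List.nil_append]
      have hdrop : frames.drop (j + 1) = [] := List.drop_eq_nil_of_le (by omega)
      rw [hdrop]
      simp only [pvSpansOf, pvZS]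
      rw [pvFmt_eq frames a j (frames.length : Int) (by omega)]

-- the two pipelines agree on any nonempty frames list
theorem pvPipes_eq (frames : List Int) (f0 : Int) (rest : List Int) (hf : frames = f0 :: rest) :
    (fun st : List String × Int × Int => st.1 ++ [pvSpanA st.2.1 st.2.2])
      ((PySem.List.pyRange 1 (frames.length : Int) 1).foldl
        (fun st i => pvStepA st (PySem.List.pyGetD frames i 0))
        ([], PySem.List.pyGetD frames 0 0, PySem.List.pyGetD frames 0 0))
      = ((0 :: ((PySem.List.pyRange 1 (frames.length : Int) 1).filter
            (fun i => decide (PySem.List.pyGetD frames i 0 ≠ PySem.List.pyGetD frames (i - 1) 0 + 1))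
          ++ [(frames.length : Int)])).zip
          (PySem.List.slice
            (0 :: ((PySem.List.pyRange 1 (frames.length : Int) 1).filter
              (fun i => decide (PySem.List.pyGetD frames i 0 ≠ PySem.List.pyGetD frames (i - 1) 0 + 1))
              ++ [(frames.length : Int)])) (some 1) none)).map
        (fun p => pvFmt frames p.1 p.2) := by
  have h0 : 0 < frames.length := by rw [hf]; simp
  have e0 : PySem.List.pyGetD frames 0 0 = f0 := by rw [hf, PySem.List.pyGetD_zero_cons]
  rw [e0, PySem.List.foldl_pyRange_pyGetD' frames 0 pvStepA ([], f0, f0) (by norm_num)]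
  have edrop : frames.drop (1 : Int).toNat = rest := by rw [hf]; rfl
  rw [edrop]
  have hA := pvFoldA rest [] f0 f0
  simp only [List.nil_append] at hA
  have hbk1 : (PySem.List.pyRange 1 (frames.length : Int) 1).filter
      (fun i => decide (PySem.List.pyGetD frames i 0 ≠ PySem.List.pyGetD frames (i - 1) 0 + 1))
      = pvBk frames 1 := by
    unfold pvBk; norm_num
  have hB : pvSpansOf f0 f0 rest
      = ((0 :: (pvBk frames 1 ++ [(frames.length : Int)])).zip
          (PySem.List.slice (0 :: (pvBk frames 1 ++ [(frames.length : Int)])) (some 1) none)).map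
        (fun p => pvFmt frames p.1 p.2) := by
    rw [PySem.List.slice_from_one, List.tail_cons, pvZip_eq]
    have hM := pvMain frames frames.length 0 0 (by omega) h0
    have eg : frames.getD 0 0 = f0 := by rw [hf]; rfl
    have edrop1 : frames.drop 1 = rest := by rw [hf]; rfl
    rw [eg, edrop1] at hM
    simpa using hM
  rw [hbk1]
  exact hA.trans hB

-- ===== VERDICT (by name: the statement is the Claim_ definition above) =====
theorem create_frame_spans_spec : Claim_equal_create_frame_spans := by
  intro frame_numbers _
  unfold Spec_create_frame_spans create_frame_spans create_frame_spans_alt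
  by_cases hnil : frame_numbers = []
  · simp [hnil]
  · simp only [if_neg hnil]
    by_cases hfe : PySem.List.sorted
        ((frame_numbers.filter (fun f => PySem.Str.strIsdigit f)).map
          (fun f => (PySem.Int.ofStr? f).getD 0)) (fun x => x) false = []
    · rw [hfe]; simp
    · simp only [if_neg hfe]
      obtain ⟨f0, rest, hf⟩ := List.exists_cons_of_ne_nil hfe
      exact congrArg (fun l => "(" ++ PySem.Str.join ", " l ++ ")")
        (pvPipes_eq _ f0 rest hf)
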